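-- pv_equiv track=rewrite | github.com/YingjingLu/Cai-Ji | google/string_comp.py | compare_string
-- ===== SOURCE A (Python) =====
-- def get_least_freq( string ):
--     if len( string ) == 0:
--         return 0
--     freq_dict = dict()
--     for i in string:
--         idx = ord( i )
--         freq_dict[ idx ] = freq_dict.get( idx, 0 ) + 1
--     least = min( freq_dict.keys() )
--     return freq_dict[ least ]
--
-- def compare_string( A, B ):
--     lst1 = A.split( "," )
--     lst2 = B.split( "," )
--     freq_1 = [ get_least_freq( s ) for s in lst1 ]
--     freq_2 = [ get_least_freq( s ) for s in lst2 ]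
--
--     res = []
--     if len( lst2 ) == 0:
--         return res
--     for tar_freq in freq_2:
--         count = 0
--         for src_freq in freq_1:
--             if src_freq < tar_freq:
--                 count += 1
--         res.append( count )
--     return res
-- ===== SOURCE B (Python) =====
-- def compare_string(A, B):
--     # least frequency = how often the smallest character occurs (0 for "")
--     def least_freq(s):
--         if not s:
--             return 0
--         return s.count(min(s))
--
--     freq_1 = sorted(least_freq(s) for s in A.split(","))
--     res = []
--     for s in B.split(","):
--         t = least_freq(s)
--         # bisect_left: number of entries of the sorted freq_1 that are < t
--         lo, hi = 0, len(freq_1)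
--         while lo < hi:
--             mid = (lo + hi) // 2
--             if freq_1[mid] < t:
--                 lo = mid + 1
--             else:
--                 hi = mid
--         res.append(lo)
--     return res
-- ===== Notes on version B (the rewrite author's own statement) =====
-- stated objective: faster
-- what changed: B computes each piece's least-frequency as count(min(piece)) instead of a dict of ord-frequencies, sorts the source frequencies once and finds each target's answer by a binary search (bisect_left) instead of rescanning the whole source list per target.
import Mathlib
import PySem

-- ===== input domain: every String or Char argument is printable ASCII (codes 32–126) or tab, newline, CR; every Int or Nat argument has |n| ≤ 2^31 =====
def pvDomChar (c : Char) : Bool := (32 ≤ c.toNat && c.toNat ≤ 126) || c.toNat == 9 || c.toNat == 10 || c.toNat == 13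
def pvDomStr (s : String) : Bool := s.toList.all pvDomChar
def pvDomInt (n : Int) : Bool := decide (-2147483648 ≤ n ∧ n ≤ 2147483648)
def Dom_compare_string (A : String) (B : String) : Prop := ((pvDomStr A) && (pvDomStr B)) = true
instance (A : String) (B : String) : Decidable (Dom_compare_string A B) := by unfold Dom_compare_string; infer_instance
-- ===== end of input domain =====

-- B sorts the per-piece least-frequencies of A's list once and binary-searches each target
-- frequency instead of rescanning the whole source list per target (objective: faster).


-- ===== PORT A =====
-- get_least_freq: dict of ord-frequencies, then the frequency of the smallest key.
def get_least_freq (s : String) : Int :=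
  if s.toList.length = 0 then 0
  else
    let freq_dict : PySem.Dict Int Int :=
      s.toList.foldl (fun d c => d.modify ((c.toNat : Int)) 0 (· + 1)) PySem.Dict.empty
    match PySem.List.min? freq_dict.keys (fun k => k) with
    | none => 0            -- unreachable: the dict is nonempty here (min() never sees an empty sequence)
    | some least => freq_dict.getD least 0   -- freq_dict[least]: the key is present, so getD is exact

def compare_string (A : String) (B : String) : List Int :=
  let lst1 := (PySem.Str.split? A ",").getD []   -- sep "," ≠ "", so split? is always some
  let lst2 := (PySem.Str.split? B ",").getD []
  let freq_1 := lst1.map get_least_freq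
  let freq_2 := lst2.map get_least_freq
  if lst2.length = 0 then []
  else
    freq_2.foldl (fun res tar_freq =>
      res ++ [freq_1.foldl (fun count src_freq => if src_freq < tar_freq then count + 1 else count) (0 : Int)]) []

-- ===== PORT B =====
-- least_freq: the count of the minimal character (0 for the empty piece).
def leastFreqAlt (s : String) : Int :=
  match PySem.List.min? s.toList (fun c => c) with   -- none ↔ s is empty ("if not s: return 0")
  | none => 0
  | some c => (s.toList.count c : Int)   -- s.count(c) for the single character c

-- the hand-written bisect_left loop of Source B; a[mid] is in range whenever lo < hi ≤ len a, so getD is exact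
def bisectLoop (a : List Int) (x : Int) (lo hi : Nat) : Nat :=
  if lo < hi then
    let mid := (lo + hi) / 2
    if a.getD mid 0 < x then bisectLoop a x (mid + 1) hi
    else bisectLoop a x lo mid
  else lo
termination_by hi - lo
decreasing_by all_goals omega

def compare_string_alt (A : String) (B : String) : List Int :=
  let freq_1 := PySem.List.sorted (((PySem.Str.split? A ",").getD []).map leastFreqAlt) (fun x => x) false
  ((PySem.Str.split? B ",").getD []).map (fun s =>
    (bisectLoop freq_1 (leastFreqAlt s) 0 freq_1.length : Int))

-- ===== PRECONDITION & SPEC =====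
def Spec_compare_string (A : String) (B : String) (out : List Int) : Prop := out = compare_string_alt A B
instance (A : String) (B : String) (out : List Int) : Decidable (Spec_compare_string A B out) := by unfold Spec_compare_string; infer_instance

-- ===== CLAIM (what is proved, stated in full; the proofs are below) =====
def Claim_equal_compare_string : Prop := ∀ (A : String) (B : String), Dom_compare_string A B → Spec_compare_string A B (compare_string A B)

-- ===== LEMMAS AND PROOFS =====

theorem leastFreq_agree (s : String) : get_least_freq s = leastFreqAlt s := by
  unfold get_least_freq leastFreqAlt
  cases hcs : s.toList with
  | nil => simp [PySem.List.min?]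
  | cons c0 t =>
    have hd : (c0 :: t).foldl (fun d c => d.modify ((c.toNat : Int)) 0 (· + 1)) PySem.Dict.empty
        = PySem.Dict.counter ((c0 :: t).map (fun c => (c.toNat : Int))) := by
      rw [PySem.Dict.counter_eq_foldl, List.foldl_map]
    simp only [List.length_cons, Nat.add_one_ne_zero, if_false, hd]
    -- the minimum key of the counter is ord of the minimum character
    obtain ⟨cm, hcm⟩ : ∃ cm, PySem.List.min? (c0 :: t) (fun c => c) = some cm := by
      cases h : PySem.List.min? (c0 :: t) (fun c : Char => c) with
      | none => exact absurd ((PySem.List.min?_eq_none_iff _ _).mp h) (by simp)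
      | some cm => exact ⟨cm, rfl⟩
    obtain ⟨m, hm⟩ : ∃ m, PySem.List.min? (PySem.Dict.counter ((c0 :: t).map (fun c => (c.toNat : Int)))).keys (fun k => k) = some m := by
      cases h : PySem.List.min? (PySem.Dict.counter ((c0 :: t).map (fun c => (c.toNat : Int)))).keys (fun k : Int => k) with
      | none =>
        have := (PySem.List.min?_eq_none_iff _ _).mp h
        rw [PySem.Dict.keys_counter] at this
        have : ((c0.toNat : Int)) ∈ (PySem.Set.ofList ((c0 :: t).map (fun c => (c.toNat : Int)))) := by
          rw [PySem.Set.mem_ofList]; simp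
        simp_all
      | some m => exact ⟨m, rfl⟩
    rw [hm, hcm]
    have hmem : m ∈ (c0 :: t).map (fun c => (c.toNat : Int)) := by
      have := PySem.List.min?_mem hm
      rwa [PySem.Dict.keys_counter, PySem.Set.mem_ofList] at this
    have hcmmem : cm ∈ c0 :: t := PySem.List.min?_mem hcm
    have hmeq : m = (cm.toNat : Int) := by
      obtain ⟨c, hc, hceq⟩ := List.mem_map.mp hmem
      have h1 : m ≤ (cm.toNat : Int) := by
        refine PySem.List.min?_isMin hm _ ?_
        rw [PySem.Dict.keys_counter, PySem.Set.mem_ofList]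
        exact List.mem_map.mpr ⟨cm, hcmmem, rfl⟩
      have h2 : cm ≤ c := PySem.List.min?_isMin hcm _ hc
      have h2' : (cm.toNat : Int) ≤ m := by
        rw [← hceq]
        have h3 : cm.toNat ≤ c.toNat := Fin.mk_le_mk.mp h2
        exact_mod_cast h3
      omega
    simp only [hmeq, PySem.Dict.getD_counter]
    exact congrArg _ (List.count_map_of_injective (c0 :: t) (fun c : Char => (c.toNat : Int))
      (fun a b h => by
        have h2 : a.toNat = b.toNat := Int.natCast_inj.mp h
        exact Char.ext (UInt32.toNat_inj.mp h2)) cm)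

theorem sorted_getD_lt_iff (x : Int) : ∀ (l : List Int), l.Pairwise (· ≤ ·) →
    ∀ i, i < l.length → (l.getD i 0 < x ↔ i < l.countP (fun v => decide (v < x))) := by
  intro l
  induction l with
  | nil => intro _ i hi; simp at hi
  | cons a t ih =>
    intro hp i hi
    have hpt := (List.pairwise_cons.mp hp).2
    have ha := (List.pairwise_cons.mp hp).1
    by_cases hax : a < x
    · cases i with
      | zero => simp [hax]
      | succ j =>
        have := ih hpt j (by simpa using hi)
        simp only [List.getD_cons_succ, List.countP_cons, hax]
        simpa [Nat.succ_lt_succ_iff] using this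
    · have hct : t.countP (fun v => decide (v < x)) = 0 := by
        rw [List.countP_eq_zero]
        intro b hb
        simp only [decide_eq_true_eq]
        exact fun hbx => hax (lt_of_le_of_lt (ha b hb) hbx)
      cases i with
      | zero => simp [hax, hct]
      | succ j =>
        have hj : j < t.length := by simpa using hi
        have hc0 : (a :: t).countP (fun v => decide (v < x)) = 0 := by
          simp [hct, hax]
        rw [List.getD_cons_succ, hc0]
        constructor
        · intro hlt
          have : t.getD j 0 ∈ t := by
            rw [List.getD_eq_getElem _ _ hj]; exact List.getElem_mem hj
          exact absurd hlt (fun h => hax (lt_of_le_of_lt (ha _ this) h))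
        · omega

theorem bisectLoop_eq_aux (l : List Int) (x : Int) (hp : l.Pairwise (· ≤ ·)) :
    ∀ n lo hi, hi - lo ≤ n → lo ≤ l.countP (fun v => decide (v < x)) →
      l.countP (fun v => decide (v < x)) ≤ hi → hi ≤ l.length →
      bisectLoop l x lo hi = l.countP (fun v => decide (v < x)) := by
  intro n
  induction n with
  | zero =>
    intro lo hi h1 h2 h3 h4
    rw [bisectLoop]
    have : ¬ lo < hi := by omega
    simp [this]; omega
  | succ n ih =>
    intro lo hi h1 h2 h3 h4
    rw [bisectLoop]
    by_cases hlh : lo < hi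
    · simp only [hlh, if_true]
      have hmid1 : lo ≤ (lo + hi) / 2 := by omega
      have hmid2 : (lo + hi) / 2 < hi := by omega
      have hmlen : (lo + hi) / 2 < l.length := by omega
      have hchar := sorted_getD_lt_iff x l hp ((lo + hi) / 2) hmlen
      by_cases hm : l.getD ((lo + hi) / 2) 0 < x
      · simp only [hm, if_true]
        exact ih _ _ (by omega) (by have := hchar.mp hm; omega) h3 h4
      · simp only [hm, if_false]
        have : l.countP (fun v => decide (v < x)) ≤ (lo + hi) / 2 := by
          by_contra h
          exact hm (hchar.mpr (by omega))
        exact ih _ _ (by omega) h2 this (by omega)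
    · simp [hlh]; omega

theorem bisectLoop_eq (l : List Int) (x : Int) (hp : l.Pairwise (· ≤ ·)) :
    bisectLoop l x 0 l.length = l.countP (fun v => decide (v < x)) := by
  exact bisectLoop_eq_aux l x hp l.length 0 l.length (by omega) (by omega)
    (by simpa using l.countP_le_length) (le_refl _)


theorem compare_string_eq_alt (A B : String) : compare_string A B = compare_string_alt A B := by
  unfold compare_string compare_string_alt
  simp only []
  set lst1 := (PySem.Str.split? A ",").getD [] with hl1
  set lst2 := (PySem.Str.split? B ",").getD [] with hl2
  set s1 := PySem.List.sorted (lst1.map leastFreqAlt) (fun x => x) false with hs1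
  have hperm : s1.Perm (lst1.map get_least_freq) := by
    have h := PySem.List.sorted_perm (lst1.map leastFreqAlt) (fun x : Int => x) false
    rw [← hs1] at h
    have hmap : lst1.map leastFreqAlt = lst1.map get_least_freq :=
      List.map_congr_left (fun a _ => (leastFreq_agree a).symm)
    rwa [hmap] at h
  have hpair : s1.Pairwise (· ≤ ·) := by
    have h := PySem.List.sorted_pairwise (lst1.map leastFreqAlt) (fun x : Int => x)
    rw [← hs1] at h
    exact h
  by_cases h2 : lst2.length = 0
  · have : lst2 = [] := List.length_eq_zero_iff.mp h2
    simp [this]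
  · simp only [h2, if_false]
    rw [List.foldl_map]
    have hfun : (fun (res : List Int) (s : String) =>
          (fun res tar_freq => res ++ [List.foldl (fun count src_freq => if src_freq < tar_freq then count + 1 else count) 0 (lst1.map get_least_freq)]) res (get_least_freq s))
        = (fun res s => res ++ [((lst1.map get_least_freq).countP (fun v => decide (v < get_least_freq s)) : Int)]) := by
      funext acc s
      beta_reduce
      rw [PySem.List.foldl_ite_add_one (fun v => v < get_least_freq s) (lst1.map get_least_freq) 0]
      simp
    rw [hfun, PySem.List.foldl_append_singleton_eq_map]
    rw [List.nil_append]
    apply List.map_congr_left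
    intro s _
    rw [bisectLoop_eq s1 _ hpair, hperm.countP_eq, leastFreq_agree s]

-- ===== VERDICT (by name: the statement is the Claim_ definition above) =====
theorem compare_string_spec : Claim_equal_compare_string := by
  intro A B _
  unfold Spec_compare_string
  exact compare_string_eq_alt A B
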